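-- pv_equiv track=rewrite | github.com/opper-ai/opperator | templates/python-base/opperator/protocol.py | _normalize_slash
-- ===== SOURCE A (Python) =====
-- def _normalize_slash(value: str) -> str:
--     candidate = str(value).strip().lstrip('/')
--     if not candidate:
--         candidate = "command"
--     cleaned = []
--     for ch in candidate:
--         if ch.isalnum() or ch in {'_', '-', ':'}:
--             cleaned.append(ch.lower())
--         elif ch.isspace() and (not cleaned or cleaned[-1] != '_'):
--             cleaned.append('_')
--         elif cleaned and cleaned[-1] != '_':
--             cleaned.append('_')
--     slug = ''.join(cleaned).strip('_')
--     if not slug: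
--         slug = candidate.replace(' ', '_').lower()
--     return f"/{slug}"
-- ===== SOURCE B (Python) =====
-- def _normalize_slash(value: str) -> str:
--     candidate = str(value).strip().lstrip('/')
--     if not candidate:
--         candidate = "command"
--     # map pass: allowed characters lowered, everything else a None sentinel
--     mapped = [ch.lower() if ch.isalnum() or ch in '_-:' else None for ch in candidate]
--     # collapse pass over runs: a sentinel run becomes one '_'; a sentinel run
--     # right after an emitted '_' is absorbed into it
--     out = []
--     i, n = 0, len(mapped)
--     while i < n:
--         ch = mapped[i]
--         i += 1
--         if ch is None:
--             out.append('_')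
--         else:
--             out.append(ch)
--             if ch != '_':
--                 continue
--         while i < n and mapped[i] is None:
--             i += 1
--     slug = ''.join(out).strip('_')
--     if not slug:
--         slug = ''.join('_' if ch == ' ' else ch.lower() for ch in candidate)
--     return f"/{slug}"
-- ===== Notes on version B (the rewrite author's own statement) =====
-- stated objective: alternative
-- what changed: Replaces A's stateful character loop that inspects the last appended character with a two-pass pipeline: a map pass turning each character into its lowered form or a None sentinel, then a run-collapsing scan whose inner skip loop turns each sentinel run into a single underscore and absorbs runs that follow an emitted underscore.
import Mathlib
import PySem

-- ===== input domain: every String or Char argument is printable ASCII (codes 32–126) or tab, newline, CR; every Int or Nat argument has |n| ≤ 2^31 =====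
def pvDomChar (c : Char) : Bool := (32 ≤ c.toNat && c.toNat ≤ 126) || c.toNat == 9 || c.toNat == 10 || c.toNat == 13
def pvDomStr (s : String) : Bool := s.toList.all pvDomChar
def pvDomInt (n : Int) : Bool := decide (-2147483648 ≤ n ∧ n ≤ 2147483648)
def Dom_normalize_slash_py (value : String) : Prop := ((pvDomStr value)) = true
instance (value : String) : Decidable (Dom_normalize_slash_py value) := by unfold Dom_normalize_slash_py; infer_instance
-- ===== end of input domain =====

-- B replaces A's stateful last-char-tracking loop by a sentinel map pass followed by a
-- run-collapsing scan (alternative decomposition, same cost).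

-- ===== PORT A =====
-- the loop body of A: append lowered char, or a collapsing '_' depending on the last appended char
def pvStepA (cleaned : List Char) (ch : Char) : List Char :=
  if PySem.Chars.isalnum ch || (ch == '_' || ch == '-' || ch == ':') then
    cleaned ++ [PySem.Chars.lowerChar ch]
  else if PySem.Chars.isspace ch && (cleaned.isEmpty || cleaned.getLast? != some '_') then
    cleaned ++ ['_']
  else if !cleaned.isEmpty && cleaned.getLast? != some '_' then
    cleaned ++ ['_']
  else cleaned

def normalize_slash_py (value : String) : String :=
  -- .strip() then .lstrip('/'): dropWhile (· == '/') is exact for lstrip with the single char '/'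
  let candidate := List.dropWhile (· == '/') (PySem.Str.strip value).toList
  let candidate := if candidate.isEmpty then "command".toList else candidate
  let cleaned := candidate.foldl pvStepA []
  let slug := PySem.Chars.stripChars cleaned ['_']
  let slug := if slug.isEmpty then PySem.Chars.lower (PySem.Chars.replace candidate [' '] ['_']) else slug
  String.ofList ('/' :: slug)

-- ===== PORT B =====
-- Source B's map pass: an allowed character is lowered, anything else becomes the None sentinel
def pvMapB (ch : Char) : Option Char :=
  if PySem.Chars.isalnum ch || List.contains ['_', '-', ':'] ch then
    some (PySem.Chars.lowerChar ch)
  else none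

-- Source B's collapse pass (the while loop over runs): a sentinel run yields a single '_',
-- and a sentinel run immediately after an emitted '_' is absorbed (the inner skip loop)
def pvCollapse : List (Option Char) → List Char
  | [] => []
  | none :: rest => '_' :: pvCollapse (rest.dropWhile Option.isNone)
  | some c :: rest =>
      c :: (if c == '_' then pvCollapse (rest.dropWhile Option.isNone) else pvCollapse rest)
termination_by l => l.length
decreasing_by
  · exact Nat.lt_succ_of_le (List.length_dropWhile_le _ _)
  · exact Nat.lt_succ_of_le (List.length_dropWhile_le _ _)
  · simp

def normalize_slash_py_alt (value : String) : String :=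
  -- .strip() then .lstrip('/'): dropWhile (· == '/') is exact for lstrip with the single char '/'
  let candidate := ((PySem.Str.strip value).toList).dropWhile (fun c => c == '/')
  let candidate := match candidate with
    | [] => "command".toList
    | cs => cs
  let slug := PySem.Chars.stripChars (pvCollapse (candidate.map pvMapB)) ['_']
  let slug := match slug with
    | [] => candidate.map (fun ch => if ch == ' ' then '_' else PySem.Chars.lowerChar ch)
    | s => s
  String.ofList ('/' :: slug)

-- ===== PRECONDITION & SPEC =====
def Spec_normalize_slash_py (value : String) (out : String) : Prop := out = normalize_slash_py_alt value
instance (value : String) (out : String) : Decidable (Spec_normalize_slash_py value out) := by unfold Spec_normalize_slash_py; infer_instance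

-- ===== CLAIM (what is proved, stated in full; the proofs are below) =====
def Claim_equal_normalize_slash_py : Prop := ∀ (value : String), Dom_normalize_slash_py value → Spec_normalize_slash_py value (normalize_slash_py value)

-- ===== LEMMAS AND PROOFS =====

-- the allowed-character test shared by both Python sources
def pvGood (c : Char) : Bool := PySem.Chars.isalnum c || (c == '_' || c == '-' || c == ':')

theorem pvMapB_eq (c : Char) :
    pvMapB c = if pvGood c then some (PySem.Chars.lowerChar c) else none := by
  unfold pvMapB pvGood
  have h : List.contains ['_', '-', ':'] c = (c == '_' || c == '-' || c == ':') := by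
    simp only [List.contains_cons, List.contains_nil, Bool.or_false, Bool.or_assoc]
  rw [h]

-- A's loop relative to the last appended character (none = nothing appended yet)
def pvTailA : Option Char → List Char → List Char
  | _, [] => []
  | lo, ch :: cs =>
    if pvGood ch then PySem.Chars.lowerChar ch :: pvTailA (some (PySem.Chars.lowerChar ch)) cs
    else match lo with
      | none => if PySem.Chars.isspace ch then '_' :: pvTailA (some '_') cs else pvTailA none cs
      | some a => if a = '_' then pvTailA (some '_') cs else '_' :: pvTailA (some '_') cs

theorem pvTailA_cons (lo : Option Char) (ch : Char) (cs : List Char) :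
    pvTailA lo (ch :: cs) =
      (if pvGood ch then PySem.Chars.lowerChar ch :: pvTailA (some (PySem.Chars.lowerChar ch)) cs
       else match lo with
         | none => if PySem.Chars.isspace ch then '_' :: pvTailA (some '_') cs else pvTailA none cs
         | some a => if a = '_' then pvTailA (some '_') cs else '_' :: pvTailA (some '_') cs) := rfl

theorem pv_foldA (cs : List Char) : ∀ acc : List Char,
    cs.foldl pvStepA acc = acc ++ pvTailA acc.getLast? cs := by
  induction cs with
  | nil => intro acc; simp [pvTailA]
  | cons ch cs ih =>
    intro acc
    rw [List.foldl_cons, ih]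
    rw [pvTailA_cons]
    by_cases hg : pvGood ch = true
    · rw [if_pos hg]
      have : pvStepA acc ch = acc ++ [PySem.Chars.lowerChar ch] := by
        unfold pvStepA pvGood at *
        rw [if_pos hg]
      rw [this]
      simp
    · rw [if_neg hg]
      cases hl : acc.getLast? with
      | none =>
        have hacc : acc = [] := by simpa using hl
        subst hacc
        by_cases hs : PySem.Chars.isspace ch = true
        · have : pvStepA [] ch = ['_'] := by
            unfold pvStepA pvGood at *
            rw [if_neg hg, if_pos (by simp [hs])]
            simp
          simp [this, hs]
        · have : pvStepA [] ch = [] := by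
            unfold pvStepA pvGood at *
            rw [if_neg hg, if_neg (by simp [hs]), if_neg (by simp)]
          simp [this, hs]
      | some a =>
        have hne : acc ≠ [] := by intro h; subst h; simp at hl
        by_cases ha : a = '_'
        · subst ha
          have : pvStepA acc ch = acc := by
            unfold pvStepA pvGood at *
            rw [if_neg hg, if_neg (by simp [hl, hne]), if_neg (by simp [hl])]
          simp [this, hl]
        · have : pvStepA acc ch = acc ++ ['_'] := by
            unfold pvStepA pvGood at *
            by_cases hs : PySem.Chars.isspace ch = true
            · rw [if_neg hg, if_pos (by simp [hs, hl, ha])]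
            · rw [if_neg hg, if_neg (by simp [hs]),
                if_pos (by simp [hl, ha, hne])]
          rw [this]
          simp [ha]

-- A's tail loop from a known last char is exactly B's collapse (skipping a sentinel run after '_')
theorem pv_some (cs : List Char) : ∀ a : Char,
    pvTailA (some a) cs =
      if a = '_' then pvCollapse ((cs.map pvMapB).dropWhile Option.isNone)
      else pvCollapse (cs.map pvMapB) := by
  induction cs with
  | nil => intro a; simp [pvTailA, pvCollapse]
  | cons c cs ih =>
    intro a
    by_cases hg : pvGood c = true
    · rw [show pvTailA (some a) (c :: cs)
            = PySem.Chars.lowerChar c :: pvTailA (some (PySem.Chars.lowerChar c)) cs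
          from by rw [pvTailA_cons]; simp [hg]]
      have hmap : (c :: cs).map pvMapB = some (PySem.Chars.lowerChar c) :: cs.map pvMapB := by
        simp [pvMapB_eq, hg]
      rw [ih]
      by_cases ha : a = '_'
      · rw [if_pos ha, hmap]
        rw [show ((some (PySem.Chars.lowerChar c) :: cs.map pvMapB).dropWhile Option.isNone)
              = some (PySem.Chars.lowerChar c) :: cs.map pvMapB from by simp [List.dropWhile]]
        rw [pvCollapse]
        by_cases hc : PySem.Chars.lowerChar c = '_'
        · simp [hc]
        · simp [hc]
      · rw [if_neg ha, hmap, pvCollapse]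
        by_cases hc : PySem.Chars.lowerChar c = '_'
        · simp [hc]
        · simp [hc]
    · rw [show pvTailA (some a) (c :: cs)
            = (if a = '_' then pvTailA (some '_') cs else '_' :: pvTailA (some '_') cs)
          from by rw [pvTailA_cons]; simp [hg]]
      have hmap : (c :: cs).map pvMapB = none :: cs.map pvMapB := by
        simp [pvMapB_eq, hg]
      by_cases ha : a = '_'
      · rw [if_pos ha, if_pos ha, ih, if_pos rfl, hmap]
        simp [List.dropWhile]
      · rw [if_neg ha, if_neg ha, ih, if_pos rfl, hmap, pvCollapse]

-- A's tail loop from the initial state: equal to the collapse of the sentinel-stripped map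
-- up to a leading all-'_' pad (skipped leading garbage vs a leading emitted '_')
theorem pv_none (cs : List Char) :
    ∃ u, (∀ x ∈ u, x = '_') ∧
      pvTailA none cs = u ++ pvCollapse ((cs.map pvMapB).dropWhile Option.isNone) := by
  induction cs with
  | nil => exact ⟨[], by simp, by simp [pvTailA, pvCollapse]⟩
  | cons c cs ih =>
    by_cases hg : pvGood c = true
    · refine ⟨[], by simp, ?_⟩
      rw [show pvTailA none (c :: cs)
            = PySem.Chars.lowerChar c :: pvTailA (some (PySem.Chars.lowerChar c)) cs
          from by rw [pvTailA_cons]; simp [hg]]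
      have hmap : (c :: cs).map pvMapB = some (PySem.Chars.lowerChar c) :: cs.map pvMapB := by
        simp [pvMapB_eq, hg]
      rw [hmap, pv_some,
        show ((some (PySem.Chars.lowerChar c) :: cs.map pvMapB).dropWhile Option.isNone)
          = some (PySem.Chars.lowerChar c) :: cs.map pvMapB from by simp [List.dropWhile],
        pvCollapse]
      by_cases hc : PySem.Chars.lowerChar c = '_'
      · simp [hc]
      · simp [hc]
    · have hmap : (c :: cs).map pvMapB = none :: cs.map pvMapB := by
        simp [pvMapB_eq, hg]
      have hdrop : ((c :: cs).map pvMapB).dropWhile Option.isNone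
          = (cs.map pvMapB).dropWhile Option.isNone := by
        rw [hmap]; simp [List.dropWhile]
      by_cases hs : PySem.Chars.isspace c = true
      · refine ⟨['_'], by simp, ?_⟩
        rw [show pvTailA none (c :: cs) = '_' :: pvTailA (some '_') cs
            from by rw [pvTailA_cons]; simp [hg, hs]]
        rw [pv_some, if_pos rfl, hdrop]
        simp
      · obtain ⟨u, hu, heq⟩ := ih
        refine ⟨u, hu, ?_⟩
        rw [show pvTailA none (c :: cs) = pvTailA none cs
            from by rw [pvTailA_cons]; simp [hg, hs]]
        rw [heq, hdrop]

-- B's collapse equals the collapse of the sentinel-stripped list up to a leading '_' pad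
theorem pv_collapse_drop (m : List (Option Char)) :
    ∃ v, (∀ x ∈ v, x = '_') ∧
      pvCollapse m = v ++ pvCollapse (m.dropWhile Option.isNone) := by
  cases m with
  | nil => exact ⟨[], by simp, by simp⟩
  | cons o rest =>
    cases o with
    | none =>
      refine ⟨['_'], by simp, ?_⟩
      rw [pvCollapse]
      simp [List.dropWhile]
    | some c =>
      refine ⟨[], by simp, ?_⟩
      simp [List.dropWhile]

theorem pv_dropWhile_pad (p : Char → Bool) (u y : List Char) (hu : ∀ c ∈ u, p c = true) :
    List.dropWhile p (u ++ y) = List.dropWhile p y := by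
  rw [List.dropWhile_append]
  rw [if_pos (by simp [List.dropWhile_eq_nil_iff]; exact hu)]

-- strip('_') ignores a leading all-'_' pad
theorem pv_strip_pad (u x : List Char) (hu : ∀ c ∈ u, c = '_') :
    PySem.Chars.stripChars (u ++ x) ['_'] = PySem.Chars.stripChars x ['_'] := by
  simp only [PySem.Chars.stripChars]
  rw [pv_dropWhile_pad _ u x (by intro c hc; simp [hu c hc])]

-- the fallback: A's replace-then-lower equals B's per-character substitution
theorem pv_replace_go (fuel : Nat) : ∀ (l acc : List Char), l.length ≤ fuel →
    PySem.Chars.replace.go [' '] ['_'] fuel l acc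
      = acc.reverse ++ l.map (fun c => if c = ' ' then '_' else c) := by
  induction fuel with
  | zero =>
    intro l acc h
    have : l = [] := List.length_eq_zero_iff.mp (Nat.le_zero.mp h)
    subst this
    simp [PySem.Chars.replace.go]
  | succ n ih =>
    intro l acc h
    cases l with
    | nil => simp [PySem.Chars.replace.go]
    | cons c t =>
      rw [PySem.Chars.replace.go.eq_def]
      dsimp only
      by_cases hc : c = ' '
      · subst hc
        rw [if_pos (by simp [List.isPrefixOf])]
        rw [ih _ _ (by simpa using h)]
        simp
      · rw [if_neg (by simp [List.isPrefixOf]; exact fun hx => absurd hx.symm hc)]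
        rw [ih _ _ (by simpa using h)]
        simp [hc]

theorem pv_fallback (l : List Char) :
    PySem.Chars.lower (PySem.Chars.replace l [' '] ['_'])
      = l.map (fun ch => if ch == ' ' then '_' else PySem.Chars.lowerChar ch) := by
  rw [PySem.Chars.replace]
  rw [if_neg (by simp)]
  rw [pv_replace_go l.length l [] le_rfl]
  simp only [List.reverse_nil, List.nil_append, PySem.Chars.lower, List.map_map]
  congr 1
  funext c
  by_cases hc : c = ' '
  · simp [hc]; decide
  · simp [hc]

-- the core: A's cleaned-and-stripped list equals B's collapsed-and-stripped list
theorem pv_main (cs : List Char) :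
    PySem.Chars.stripChars (cs.foldl pvStepA []) ['_'] =
      PySem.Chars.stripChars (pvCollapse (cs.map pvMapB)) ['_'] := by
  rw [pv_foldA cs []]
  obtain ⟨u, hu, h1⟩ := pv_none cs
  obtain ⟨v, hv, h2⟩ := pv_collapse_drop (cs.map pvMapB)
  rw [show ([] : List Char) ++ pvTailA [].getLast? cs = pvTailA none cs from by simp]
  rw [h1, h2, pv_strip_pad u _ hu, pv_strip_pad v _ hv]

-- ===== VERDICT (by name: the statement is the Claim_ definition above) =====
theorem normalize_slash_py_spec : Claim_equal_normalize_slash_py := by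
  intro value _
  unfold Spec_normalize_slash_py normalize_slash_py normalize_slash_py_alt
  dsimp only
  rw [show ((PySem.Str.strip value).toList).dropWhile (fun c => c == '/')
        = List.dropWhile (· == '/') (PySem.Str.strip value).toList from rfl]
  cases hc : List.dropWhile (· == '/') (PySem.Str.strip value).toList with
  | nil =>
    simp only [List.isEmpty_nil, if_true]
    rw [pv_main]
    cases hs : PySem.Chars.stripChars (pvCollapse (("command".toList).map pvMapB)) ['_'] <;>
      simp [pv_fallback]
  | cons c cs =>
    simp only [List.isEmpty_cons, if_false, Bool.false_eq_true]
    rw [pv_main]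
    cases hs : PySem.Chars.stripChars (pvCollapse ((c :: cs).map pvMapB)) ['_'] <;>
      simp [pv_fallback]
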